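-- pv_equiv track=rewrite | github.com/nazasedann1234-cpu/algoritma-pemrograman-1C-2025 | modul-6/250441100131_Mohammad Sa'addudin/Tugas_Praktikum_Modul 6_Soal_No. 2.py | combine_and_sort
-- ===== SOURCE A (Python) =====
-- def combine_and_sort(t1, t2):
--     combined = t1 + t2
--
--     tanpa_duplikat = []
--
--     for angka in combined:
--         if angka not in tanpa_duplikat:
--             tanpa_duplikat.append(angka)
--
--     for i in range(len(tanpa_duplikat)):
--         for j in range(i + 1, len(tanpa_duplikat)):
--             if tanpa_duplikat[j] > tanpa_duplikat[i]:
--                 tanpa_duplikat[i], tanpa_duplikat[j] =  tanpa_duplikat[j], tanpa_duplikat[i]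
--
--     return tuple(tanpa_duplikat)
-- ===== SOURCE B (Python) =====
-- def combine_and_sort(t1, t2):
--     merged = sorted(t1 + t2, reverse=True)
--     result = []
--     for x in merged:
--         if not result or result[-1] != x:
--             result.append(x)
--     return tuple(result)
-- ===== Notes on version B (the rewrite author's own statement) =====
-- stated objective: faster
-- what changed: Replaces A's membership-scan dedup plus O(n^2) exchange sort with sort-first (O(n log n)) followed by a single adjacent-duplicate sweep.
import Mathlib
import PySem

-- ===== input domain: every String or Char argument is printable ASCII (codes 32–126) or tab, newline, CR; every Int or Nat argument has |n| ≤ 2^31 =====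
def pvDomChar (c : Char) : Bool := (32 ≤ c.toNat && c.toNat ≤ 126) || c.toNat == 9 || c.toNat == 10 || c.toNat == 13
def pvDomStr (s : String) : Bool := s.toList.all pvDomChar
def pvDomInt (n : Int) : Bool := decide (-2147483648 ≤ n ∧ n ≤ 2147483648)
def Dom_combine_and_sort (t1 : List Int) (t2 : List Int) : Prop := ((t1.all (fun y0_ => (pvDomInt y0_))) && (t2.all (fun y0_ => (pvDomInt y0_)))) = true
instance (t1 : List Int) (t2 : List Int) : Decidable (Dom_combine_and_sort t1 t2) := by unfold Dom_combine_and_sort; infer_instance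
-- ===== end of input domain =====

-- B replaces A's membership-scan dedup followed by a quadratic exchange sort with
-- sort-first then a single adjacent-duplicate sweep (measured faster; same return value).

-- ===== PORT A =====
-- body of A's inner loop: if tanpa[j] > tanpa[i]: tanpa[i], tanpa[j] = tanpa[j], tanpa[i]
def exchInner (i : Nat) (l : List Int) (j : Nat) : List Int :=
  if l.getD j 0 > l.getD i 0 then (l.set i (l.getD j 0)).set j (l.getD i 0) else l

def combine_and_sort (t1 : List Int) (t2 : List Int) : List Int :=
  let combined := t1 ++ t2
  let tanpa := combined.foldl (fun acc angka => if angka ∈ acc then acc else acc ++ [angka]) []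
  (List.range tanpa.length).foldl
    (fun l i => (List.range' (i+1) (tanpa.length - (i+1))).foldl (exchInner i) l) tanpa

-- ===== PORT B =====
def combine_and_sort_alt (t1 : List Int) (t2 : List Int) : List Int :=
  let merged := PySem.List.sorted (t1 ++ t2) (fun x => x) true
  merged.foldl (fun result x => if result = [] ∨ result.getLast? ≠ some x then result ++ [x] else result) []

-- ===== PRECONDITION & SPEC =====
def Spec_combine_and_sort (t1 : List Int) (t2 : List Int) (out : List Int) : Prop := out = combine_and_sort_alt t1 t2
instance (t1 : List Int) (t2 : List Int) (out : List Int) : Decidable (Spec_combine_and_sort t1 t2 out) := by unfold Spec_combine_and_sort; infer_instance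

-- ===== CLAIM (what is proved, stated in full; the proofs are below) =====
def Claim_equal_combine_and_sort : Prop := ∀ (t1 : List Int) (t2 : List Int), Dom_combine_and_sort t1 t2 → Spec_combine_and_sort t1 t2 (combine_and_sort t1 t2)

-- ===== LEMMAS AND PROOFS =====

-- A's dedup pass: nodup, and same members as the input
theorem dedup_fold_nodup_mem (xs : List Int) (acc : List Int) (hacc : acc.Nodup) :
    (xs.foldl (fun acc angka => if angka ∈ acc then acc else acc ++ [angka]) acc).Nodup ∧
    (∀ x, x ∈ xs.foldl (fun acc angka => if angka ∈ acc then acc else acc ++ [angka]) acc ↔ x ∈ acc ∨ x ∈ xs) := by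
  induction xs generalizing acc with
  | nil => simpa using hacc
  | cons y ys ih =>
    simp only [List.foldl_cons]
    by_cases hy : y ∈ acc
    · rw [if_pos hy]
      refine ⟨(ih acc hacc).1, fun x => ?_⟩
      rw [(ih acc hacc).2 x]
      simp only [List.mem_cons]
      constructor
      · rintro (h | h) <;> tauto
      · rintro (h | rfl | h) <;> tauto
    · rw [if_neg hy]
      have hacc' : (acc ++ [y]).Nodup := by
        simp [List.nodup_append, hacc]
        intro a ha b
        exact hy (b ▸ ha)
      refine ⟨(ih _ hacc').1, fun x => ?_⟩
      rw [(ih _ hacc').2 x]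
      simp only [List.mem_append, List.mem_cons]
      tauto

theorem exchInner_length (i j : Nat) (l : List Int) :
    (exchInner i l j).length = l.length := by
  unfold exchInner; split <;> simp

theorem exchInner_perm (i j : Nat) (l : List Int) (hi : i < l.length) (hj : j < l.length) :
    (exchInner i l j).Perm l := by
  unfold exchInner
  split
  · rw [List.getD_eq_getElem l 0 hi, List.getD_eq_getElem l 0 hj]
    exact List.set_set_perm hi hj
  · exact List.Perm.refl l

theorem exchInner_getD_ne (i j k : Nat) (l : List Int) (hki : k ≠ i) (hkj : k ≠ j) :
    (exchInner i l j).getD k 0 = l.getD k 0 := by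
  unfold exchInner
  split
  · simp [List.getD, List.getElem?_set_ne, Ne.symm hki, Ne.symm hkj]
  · rfl

theorem exchInner_getD_i (i j : Nat) (l : List Int) (hij : i ≠ j)
    (hi : i < l.length) (hj : j < l.length) :
    (exchInner i l j).getD i 0 ≥ l.getD i 0 ∧
    (exchInner i l j).getD i 0 ≥ (exchInner i l j).getD j 0 := by
  unfold exchInner
  split
  · rename_i h
    have h1 : ((l.set i (l.getD j 0)).set j (l.getD i 0)).getD i 0 = l.getD j 0 := by
      have hi' : i < ((l.set i (l.getD j 0)).set j (l.getD i 0)).length := by simpa using hi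
      rw [List.getD_eq_getElem _ 0 hi', List.getElem_set_ne (by omega), List.getElem_set_self]
    have h2 : ((l.set i (l.getD j 0)).set j (l.getD i 0)).getD j 0 = l.getD i 0 := by
      have hj' : j < ((l.set i (l.getD j 0)).set j (l.getD i 0)).length := by simpa using hj
      rw [List.getD_eq_getElem _ 0 hj', List.getElem_set_self]
    rw [h1, h2]
    exact ⟨le_of_lt h, le_of_lt h⟩
  · rename_i h
    exact ⟨le_refl _, by omega⟩

-- the inner loop: length kept, permutation, untouched positions kept, and
-- position i ends up dominating itself and every processed position
theorem inner_spec (js : List Nat) (i : Nat) (l : List Int)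
    (hi : i < l.length) (hjs : ∀ j ∈ js, i < j ∧ j < l.length) (hnd : js.Nodup) :
    (js.foldl (exchInner i) l).length = l.length ∧
    (js.foldl (exchInner i) l).Perm l ∧
    (∀ k, k ≠ i → k ∉ js → (js.foldl (exchInner i) l).getD k 0 = l.getD k 0) ∧
    (js.foldl (exchInner i) l).getD i 0 ≥ l.getD i 0 ∧
    (∀ j ∈ js, (js.foldl (exchInner i) l).getD i 0 ≥ (js.foldl (exchInner i) l).getD j 0) := by
  induction js generalizing l with
  | nil => exact ⟨rfl, List.Perm.refl l, fun _ _ _ => rfl, le_refl _, fun j hj => absurd hj (List.not_mem_nil)⟩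
  | cons j js ih =>
    obtain ⟨hij, hjl⟩ := hjs j List.mem_cons_self
    have hij' : i ≠ j := Nat.ne_of_lt hij
    have hlen1 : (exchInner i l j).length = l.length := exchInner_length i j l
    have hi1 : i < (exchInner i l j).length := by omega
    have hjs1 : ∀ j' ∈ js, i < j' ∧ j' < (exchInner i l j).length := by
      intro j' hj'
      have := hjs j' (List.mem_cons_of_mem _ hj')
      omega
    have hnd1 : js.Nodup := (List.nodup_cons.mp hnd).2
    have hjnot : j ∉ js := (List.nodup_cons.mp hnd).1
    obtain ⟨IH1, IH2, IH3, IH4, IH5⟩ := ih (exchInner i l j) hi1 hjs1 hnd1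
    obtain ⟨G1, G2⟩ := exchInner_getD_i i j l hij' hi hjl
    simp only [List.foldl_cons]
    refine ⟨by rw [IH1, hlen1], IH2.trans (exchInner_perm i j l hi hjl), ?_, le_trans G1 IH4, ?_⟩
    · intro k hki hkmem
      have hkj : k ≠ j := by simp [List.mem_cons] at hkmem; tauto
      have hkjs : k ∉ js := by simp [List.mem_cons] at hkmem; tauto
      rw [IH3 k hki hkjs, exchInner_getD_ne i j k l hki hkj]
    · intro j' hj'
      rcases List.mem_cons.mp hj' with rfl | hmem
      · rw [IH3 j' (Ne.symm hij') hjnot]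
        exact le_trans G2 IH4
      · exact IH5 j' hmem

-- the outer loop: starting from a state whose first i positions already dominate
-- everything after them, the remaining passes produce a permutation that is
-- fully sorted (descending, ≥) at every pair of positions
theorem outer_spec (n : Nat) (cnt : Nat) :
    ∀ (i : Nat) (l : List Int), i + cnt = n → l.length = n →
    (∀ a b, a < i → a < b → b < n → l.getD a 0 ≥ l.getD b 0) →
    ((List.range' i cnt).foldl
        (fun l i => (List.range' (i+1) (n - (i+1))).foldl (exchInner i) l) l).Perm l ∧
    (∀ a b, a < b → b < n →
      ((List.range' i cnt).foldl
        (fun l i => (List.range' (i+1) (n - (i+1))).foldl (exchInner i) l) l).getD a 0 ≥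
      ((List.range' i cnt).foldl
        (fun l i => (List.range' (i+1) (n - (i+1))).foldl (exchInner i) l) l).getD b 0) := by
  induction cnt with
  | zero =>
    intro i l hin hlen hinv
    refine ⟨List.Perm.refl l, ?_⟩
    intro a b hab hbn
    exact hinv a b (by omega) hab hbn
  | succ cnt ih =>
    intro i l hin hlen hinv
    have hi : i < l.length := by omega
    set js := List.range' (i+1) (n - (i+1)) with hjsdef
    have hjs : ∀ j ∈ js, i < j ∧ j < l.length := by
      intro j hj
      rw [hjsdef, List.mem_range'_1] at hj
      omega
    obtain ⟨I1, I2, I3, I4, I5⟩ := inner_spec js i l hi hjs (List.nodup_range' 1)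
    set l1 := js.foldl (exchInner i) l with hl1def
    -- values of l1 at positions ≥ i come from values of l at positions ≥ i
    have hsuffix : ∀ b, i ≤ b → b < n → ∃ c, i ≤ c ∧ c < n ∧ l1.getD b 0 = l.getD c 0 := by
      intro b hib hbn
      have hb1 : b < l1.length := by omega
      have htake : l1.take i = l.take i := by
        apply List.ext_getElem
        · simp; omega
        · intro k hk1 hk2
          have hki : k < i := by simp at hk1; omega
          have hkl1 : k < l1.length := by omega
          have hkl : k < l.length := by omega
          have := I3 k (by omega) (by
            rw [hjsdef, List.mem_range'_1]; omega)
          simp only [List.getElem_take]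
          rw [List.getD_eq_getElem l1 0 hkl1, List.getD_eq_getElem l 0 hkl] at this
          exact this
      have hdropperm : (l1.drop i).Perm (l.drop i) := by
        have h1 : l1.take i ++ l1.drop i = l1 := List.take_append_drop i l1
        have h2 : l.take i ++ l.drop i = l := List.take_append_drop i l
        have : (l.take i ++ l1.drop i).Perm (l.take i ++ l.drop i) := by
          rw [h2]; rw [← htake, h1]; exact I2
        exact (List.perm_append_left_iff _).mp this
      have hbl1 : l1.getD b 0 ∈ l1.drop i := by
        have hlt : b - i < (l1.drop i).length := by simp; omega
        have : (l1.drop i)[b - i] = l1[b]'hb1 := by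
          rw [List.getElem_drop]; congr 1; omega
        rw [List.getD_eq_getElem l1 0 hb1, ← this]
        exact List.getElem_mem hlt
      have hbl : l1.getD b 0 ∈ l.drop i := hdropperm.mem_iff.mp hbl1
      obtain ⟨c', hc', hgc⟩ := List.mem_iff_getElem.mp hbl
      refine ⟨i + c', by omega, by simp at hc'; omega, ?_⟩
      rw [List.getElem_drop] at hgc
      have hcl : i + c' < l.length := by simp at hc'; omega
      rw [List.getD_eq_getElem l 0 hcl]
      exact hgc.symm
    have hinv1 : ∀ a b, a < i + 1 → a < b → b < n → l1.getD a 0 ≥ l1.getD b 0 := by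
      intro a b ha hab hbn
      by_cases hai : a = i
      · subst hai
        have hbjs : b ∈ js := by rw [hjsdef, List.mem_range'_1]; omega
        exact I5 b hbjs
      · have hai' : a < i := by omega
        have hga : l1.getD a 0 = l.getD a 0 :=
          I3 a (by omega) (by rw [hjsdef, List.mem_range'_1]; omega)
        rw [hga]
        by_cases hbi : b < i
        · have hgb : l1.getD b 0 = l.getD b 0 :=
            I3 b (by omega) (by rw [hjsdef, List.mem_range'_1]; omega)
          rw [hgb]
          exact hinv a b hai' hab hbn
        · obtain ⟨c, hic, hcn, hgc⟩ := hsuffix b (by omega) hbn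
          rw [hgc]
          exact hinv a c hai' (by omega) hcn
    have hlen1 : l1.length = n := by omega
    obtain ⟨R1, R2⟩ := ih (i+1) l1 (by omega) hlen1 hinv1
    rw [List.range'_succ, List.foldl_cons]
    exact ⟨R1.trans I2, R2⟩

-- bridge for B's loop: the fold with a last-element guard is destutter'
theorem foldB_destutter' (xs : List Int) :
    ∀ (acc : List Int) (a : Int),
      xs.foldl (fun result x => if result = [] ∨ result.getLast? ≠ some x then result ++ [x] else result) (acc ++ [a]) =
      acc ++ List.destutter' (· ≠ ·) a xs := by
  induction xs with
  | nil => intro acc a; simp [List.destutter'_nil]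
  | cons x xs ih =>
    intro acc a
    simp only [List.foldl_cons]
    by_cases hax : a = x
    · subst hax
      rw [if_neg (by simp)]
      rw [ih acc a, List.destutter'_cons]
      simp
    · rw [if_pos (by right; simp [hax])]
      rw [ih (acc ++ [a]) x, List.destutter'_cons]
      simp [hax]
theorem foldB_destutter (xs : List Int) :
    xs.foldl (fun result x => if result = [] ∨ result.getLast? ≠ some x then result ++ [x] else result) [] =
    List.destutter (· ≠ ·) xs := by
  cases xs with
  | nil => rfl
  | cons x xs =>
    rw [List.foldl_cons, if_pos (Or.inl rfl)]
    have := foldB_destutter' xs [] x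
    simpa [List.destutter_cons'] using this

-- final uniqueness: two nodup, ≥-sorted lists with the same members are equal
theorem eq_of_nodup_sorted_mem (u v : List Int) (hu : u.Nodup) (hv : v.Nodup)
    (hsu : u.Pairwise (· ≥ ·)) (hsv : v.Pairwise (· ≥ ·)) (hmem : ∀ x, x ∈ u ↔ x ∈ v) : u = v := by
  exact List.Perm.eq_of_pairwise (fun a b _ _ h1 h2 => le_antisymm h2 h1) hsu hsv
    ((List.perm_ext_iff_of_nodup hu hv).2 hmem)

-- ===== VERDICT (by name: the statement is the Claim_ definition above) =====
theorem combine_and_sort_spec : Claim_equal_combine_and_sort := by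
  intro t1 t2 _
  unfold Spec_combine_and_sort combine_and_sort combine_and_sort_alt
  set combined := t1 ++ t2 with hc
  set tanpa := combined.foldl (fun acc angka => if angka ∈ acc then acc else acc ++ [angka]) [] with ht
  obtain ⟨hdnodup, hdmem⟩ := dedup_fold_nodup_mem combined [] List.nodup_nil
  rw [← ht] at hdnodup hdmem
  -- A's result
  obtain ⟨hAperm, hAsorted⟩ := outer_spec tanpa.length tanpa.length 0 tanpa (by omega) rfl
    (by intro a b h; omega)
  rw [← List.range_eq_range'] at hAperm hAsorted
  set A := (List.range tanpa.length).foldl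
      (fun l i => (List.range' (i+1) (tanpa.length - (i+1))).foldl (exchInner i) l) tanpa with hA
  have hAlen : A.length = tanpa.length := hAperm.length_eq
  have hApw : A.Pairwise (· ≥ ·) := by
    rw [List.pairwise_iff_getElem]
    intro a b ha hb hab
    have := hAsorted a b hab (by omega)
    rwa [List.getD_eq_getElem A 0 ha, List.getD_eq_getElem A 0 hb] at this
  have hAnodup : A.Nodup := hAperm.nodup_iff.mpr hdnodup
  have hAmem : ∀ x, x ∈ A ↔ x ∈ combined := by
    intro x
    rw [hAperm.mem_iff, hdmem x]
    simp
  -- B's result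
  set merged := PySem.List.sorted combined (fun x => x) true with hm
  rw [foldB_destutter merged]
  have hmpw : merged.Pairwise (fun a b => (fun x => x) b ≤ (fun x => x) a) :=
    PySem.List.sorted_pairwise_rev combined (fun x => x)
  have hmpw' : merged.Pairwise (· ≥ ·) := hmpw
  haveI : Std.Antisymm (α := Int) (· ≥ ·) := ⟨fun a b h1 h2 => le_antisymm h2 h1⟩
  have hB : List.destutter (· ≠ ·) merged = merged.dedup :=
    List.Pairwise.destutter_eq_dedup hmpw'
  rw [hB]
  have hBpw : merged.dedup.Pairwise (· ≥ ·) := hmpw'.sublist (List.dedup_sublist merged)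
  have hBmem : ∀ x, x ∈ merged.dedup ↔ x ∈ combined := by
    intro x
    rw [List.mem_dedup, hm, PySem.List.mem_sorted]
  exact eq_of_nodup_sorted_mem A merged.dedup hAnodup (List.nodup_dedup merged)
    hApw hBpw (fun x => (hAmem x).trans (hBmem x).symm)
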